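-- pv_equiv track=rewrite | github.com/pokerdio/generic | cf/cf1666i.py | foo
-- ===== SOURCE A (Python) =====
-- def pair_code(x, y, x2, y2):
--     return x * 4096 + y * 256 + x2 * 16 + y2
--
-- def foo(n, m, x, y):
--     ret = {}
--     for x1 in range(n - 1):
--         for x2 in range(x1+1, n):
--             for y1 in range(m - 1):
--                 for y2 in range(y1+1, m):
--                     code = pair_code(x1, y1, x2, y2)
--                     md = abs(x1 - x) + abs(x2 - x) + abs(y1 - y) + abs(y2 - y)
--                     ret[md] = ret.get(md, 0) + 1  # md: manhattan distance
--     return ret, max(ret.values())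
-- ===== SOURCE B (Python) =====
-- def foo(n, m, x, y):
--     # distance-distribution convolution: count x-pair distances and y-pair
--     # distances separately, then combine the two count tables.
--     dxc = {}
--     for x1 in range(n - 1):
--         for x2 in range(x1 + 1, n):
--             d = abs(x1 - x) + abs(x2 - x)
--             dxc[d] = dxc.get(d, 0) + 1
--     dyc = {}
--     for y1 in range(m - 1):
--         for y2 in range(y1 + 1, m):
--             d = abs(y1 - y) + abs(y2 - y)
--             dyc[d] = dyc.get(d, 0) + 1
--     ret = {}
--     for dx, cx in dxc.items():
--         for dy, cy in dyc.items():
--             s = dx + dy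
--             ret[s] = ret.get(s, 0) + cx * cy
--     return ret, max(ret.values())
-- ===== Notes on version B (the rewrite author's own statement) =====
-- stated objective: faster
-- what changed: B counts x-pair distances and y-pair distances in two separate count tables (O(n^2)+O(m^2)) and convolves the two tables, instead of A's quadruple loop over every (x-pair, y-pair) combination.
import Mathlib
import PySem

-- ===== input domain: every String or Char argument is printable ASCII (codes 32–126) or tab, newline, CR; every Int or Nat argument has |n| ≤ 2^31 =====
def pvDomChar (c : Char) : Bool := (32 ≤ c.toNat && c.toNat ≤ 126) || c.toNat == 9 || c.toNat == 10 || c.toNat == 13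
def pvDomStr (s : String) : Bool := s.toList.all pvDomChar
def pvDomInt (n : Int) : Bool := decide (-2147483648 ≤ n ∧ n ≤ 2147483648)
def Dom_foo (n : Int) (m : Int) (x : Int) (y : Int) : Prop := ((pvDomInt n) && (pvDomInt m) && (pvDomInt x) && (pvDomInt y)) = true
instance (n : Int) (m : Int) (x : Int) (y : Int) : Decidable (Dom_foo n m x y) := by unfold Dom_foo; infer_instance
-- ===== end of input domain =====

-- B replaces A's quadruple loop by two separate pair-distance count tables that are then convolved.

-- ===== PORT A =====
def pair_code (x : Int) (y : Int) (x2 : Int) (y2 : Int) : Int :=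
  x * 4096 + y * 256 + x2 * 16 + y2

def foo (n : Int) (m : Int) (x : Int) (y : Int) : (List (Int × Int)) × Int :=
  let ret : PySem.Dict Int Int :=
    (PySem.List.pyRange 0 (n - 1)).foldl (fun ret x1 =>
      (PySem.List.pyRange (x1 + 1) n).foldl (fun ret x2 =>
        (PySem.List.pyRange 0 (m - 1)).foldl (fun ret y1 =>
          (PySem.List.pyRange (y1 + 1) m).foldl (fun ret y2 =>
            let _code := pair_code x1 y1 x2 y2
            let md := |x1 - x| + |x2 - x| + |y1 - y| + |y2 - y|
            ret.modify md 0 (· + 1)) ret) ret) ret) PySem.Dict.empty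
  -- max(ret.values()): Pre_foo excludes n < 2 ∨ m < 2, where ret is empty and Python raises ValueError
  (ret.items, (PySem.List.max? ret.values (fun v => v)).getD 0)

-- ===== PORT B =====
def foo_alt (n : Int) (m : Int) (x : Int) (y : Int) : (List (Int × Int)) × Int :=
  let dxc : PySem.Dict Int Int :=
    (PySem.List.pyRange 0 (n - 1)).foldl (fun d x1 =>
      (PySem.List.pyRange (x1 + 1) n).foldl (fun d x2 =>
        let dd := |x1 - x| + |x2 - x|
        d.modify dd 0 (· + 1)) d) PySem.Dict.empty
  let dyc : PySem.Dict Int Int :=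
    (PySem.List.pyRange 0 (m - 1)).foldl (fun d y1 =>
      (PySem.List.pyRange (y1 + 1) m).foldl (fun d y2 =>
        let dd := |y1 - y| + |y2 - y|
        d.modify dd 0 (· + 1)) d) PySem.Dict.empty
  let ret : PySem.Dict Int Int :=
    dxc.items.foldl (fun r p =>
      dyc.items.foldl (fun r q =>
        let s := p.1 + q.1
        r.modify s 0 (· + p.2 * q.2)) r) PySem.Dict.empty
  -- max(ret.values()): Pre_foo excludes n < 2 ∨ m < 2, where ret is empty and Python raises ValueError
  (ret.items, (PySem.List.max? ret.values (fun v => v)).getD 0)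

-- ===== PRECONDITION & SPEC =====
-- Pre_foo excludes exactly the inputs (n < 2 or m < 2) on which no pair of distinct rows or columns exists,
-- the dict stays empty and Python's max() raises ValueError.
def Pre_foo (n : Int) (m : Int) (x : Int) (y : Int) : Prop := 2 ≤ n ∧ 2 ≤ m
instance (n : Int) (m : Int) (x : Int) (y : Int) : Decidable (Pre_foo n m x y) := by unfold Pre_foo; infer_instance
def pvWitness_foo : Int × Int × Int × Int := (3, 2, 1, 0)

def Spec_foo (n : Int) (m : Int) (x : Int) (y : Int) (out : (List (Int × Int)) × Int) : Prop := out = foo_alt n m x y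
instance (n : Int) (m : Int) (x : Int) (y : Int) (out : (List (Int × Int)) × Int) : Decidable (Spec_foo n m x y out) := by unfold Spec_foo; infer_instance

-- ===== CLAIM (what is proved, stated in full; the proofs are below) =====
def Claim_equal_foo : Prop := ∀ (n : Int) (m : Int) (x : Int) (y : Int), Dom_foo n m x y → Pre_foo n m x y → Spec_foo n m x y (foo n m x y)

-- ===== LEMMAS AND PROOFS =====

-- the list of x-pair (resp. y-pair) distances, in A's loop order
def pvDX (n : Int) (x : Int) : List Int :=
  (PySem.List.pyRange 0 (n - 1)).flatMap (fun x1 =>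
    (PySem.List.pyRange (x1 + 1) n).map (fun x2 => |x1 - x| + |x2 - x|))

def pvSums (A B : List Int) : List Int := A.flatMap (fun a => B.map (fun b => a + b))

-- the (key, weight) pairs of B's convolution loop, in B's loop order
def pvLB (A B : List Int) : List (Int × Int) :=
  (PySem.Dict.counter A).items.flatMap (fun p =>
    (PySem.Dict.counter B).items.map (fun q => (p.1 + q.1, p.2 * q.2)))

-- weighted counting fold (the shape of B's final loop)
def pvBump (L : List (Int × Int)) (d : PySem.Dict Int Int) : PySem.Dict Int Int :=
  L.foldl (fun d p => d.modify p.1 0 (· + p.2)) d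

-- dedup relative to a 'seen' list
def pvDD (seen : List Int) : List Int → List Int
  | [] => []
  | a :: t => if a ∈ seen then pvDD seen t else a :: pvDD (a :: seen) t

theorem pvDD_congr (l : List Int) : ∀ (s1 s2 : List Int), (∀ e : Int, e ∈ s1 ↔ e ∈ s2) →
    pvDD s1 l = pvDD s2 l := by
  induction l with
  | nil => intro _ _ _; rfl
  | cons a t ih =>
    intro s1 s2 h
    simp only [pvDD]
    by_cases ha : a ∈ s1
    · rw [if_pos ha, if_pos ((h a).1 ha), ih _ _ h]
    · rw [if_neg ha, if_neg (fun hc => ha ((h a).2 hc)), ih (a :: s1) (a :: s2)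
        (by intro e; simp [h e])]

theorem pvUpdate_eq_append_pvDD (l : List Int) : ∀ (s : PySem.Set Int),
    PySem.Set.update s l = s ++ pvDD s l := by
  induction l with
  | nil => intro s; simp [PySem.Set.update, pvDD]
  | cons a t ih =>
    intro s
    have hstep : PySem.Set.update s (a :: t) = PySem.Set.update (PySem.Set.add s a) t := rfl
    by_cases ha : a ∈ s
    · rw [hstep, PySem.Set.add_of_mem ha, ih]
      simp [pvDD, ha]
    · have hadd : PySem.Set.add s a = s ++ [a] := by
        simp [PySem.Set.add, PySem.Set.contains, ha]
      rw [hstep, hadd, ih]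
      rw [pvDD_congr t (s ++ [a]) (a :: s) (by intro e; simp [or_comm])]
      simp [pvDD, ha]

theorem pvOfList_eq_pvDD (l : List Int) : PySem.Set.ofList l = pvDD [] l := by
  have h : PySem.Set.ofList l = PySem.Set.update [] l := by
    rw [PySem.Set.ofList_eq_foldl]; rfl
  rw [h, pvUpdate_eq_append_pvDD]; simp

theorem pvUpdate_of_subset (l : List Int) : ∀ (s : PySem.Set Int), (∀ e ∈ l, e ∈ s) →
    PySem.Set.update s l = s := by
  induction l with
  | nil => intro s _; rfl
  | cons a t ih =>
    intro s h
    have hstep : PySem.Set.update s (a :: t) = PySem.Set.update (PySem.Set.add s a) t := rfl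
    rw [hstep, PySem.Set.add_of_mem (h a (by simp))]
    exact ih s (fun e he => h e (by simp [he]))

theorem pvUpdate_flatMap_dedup (g : Int → List Int) (l : List Int) :
    ∀ (seen : List Int) (s : PySem.Set Int), (∀ a ∈ seen, ∀ e ∈ g a, e ∈ s) →
    PySem.Set.update s (l.flatMap g) = PySem.Set.update s ((pvDD seen l).flatMap g) := by
  induction l with
  | nil => intro _ _ _; rfl
  | cons a t ih =>
    intro seen s h
    simp only [List.flatMap_cons, PySem.Set.update_append, pvDD]
    by_cases ha : a ∈ seen
    · rw [if_pos ha, pvUpdate_of_subset _ _ (h a ha)]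
      exact ih seen s h
    · rw [if_neg ha]
      simp only [List.flatMap_cons, PySem.Set.update_append]
      apply ih (a :: seen)
      intro a' ha' e he
      rcases List.mem_cons.1 ha' with h1 | h1
      · subst h1; exact (PySem.Set.mem_update _ _ _).2 (Or.inr he)
      · exact (PySem.Set.mem_update _ _ _).2 (Or.inl (h a' h1 e he))

theorem pvOfList_flatMap_dedup (g : Int → List Int) (l : List Int) :
    PySem.Set.ofList (l.flatMap g) = PySem.Set.ofList ((PySem.Set.ofList l).flatMap g) := by
  have h1 : ∀ z : List Int, PySem.Set.ofList z = PySem.Set.update [] z := by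
    intro z; rw [PySem.Set.ofList_eq_foldl]; rfl
  rw [h1, h1, pvOfList_eq_pvDD l]
  exact pvUpdate_flatMap_dedup g l [] [] (by simp)

theorem pvUpdate_dedup (l : List Int) (s : PySem.Set Int) :
    PySem.Set.update s l = PySem.Set.update s (PySem.Set.ofList l) := by
  have h := pvUpdate_flatMap_dedup (fun e => [e]) l [] s (by simp)
  simpa [List.flatMap_singleton', pvOfList_eq_pvDD l] using h

theorem pvUpdate_flatMap_congr (g g' : Int → List Int) (l : List Int)
    (h : ∀ a ∈ l, ∀ s : PySem.Set Int, PySem.Set.update s (g a) = PySem.Set.update s (g' a)) :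
    ∀ s : PySem.Set Int, PySem.Set.update s (l.flatMap g) = PySem.Set.update s (l.flatMap g') := by
  induction l with
  | nil => intro _; rfl
  | cons a t ih =>
    intro s
    simp only [List.flatMap_cons, PySem.Set.update_append]
    rw [h a (by simp) s]
    exact ih (fun a' ha' => h a' (by simp [ha'])) _

theorem pvUpdate_map_add (a : Int) (B : List Int) : ∀ (s : List Int),
    PySem.Set.update (s.map (fun b => a + b)) (B.map (fun b => a + b))
      = (PySem.Set.update s B).map (fun b => a + b) := by
  induction B with
  | nil => intro s; rfl
  | cons b t ih =>
    intro s
    have hstep : ∀ (u : PySem.Set Int) (c : Int) (r : List Int),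
        PySem.Set.update u (c :: r) = PySem.Set.update (PySem.Set.add u c) r := fun _ _ _ => rfl
    have hmem : (a + b) ∈ s.map (fun b => a + b) ↔ b ∈ s := by
      constructor
      · intro h; rcases List.mem_map.1 h with ⟨c, hc, hcb⟩
        have : c = b := by omega
        rwa [this] at hc
      · intro h; exact List.mem_map.2 ⟨b, h, rfl⟩
    simp only [List.map_cons, hstep]
    by_cases hb : b ∈ s
    · rw [PySem.Set.add_of_mem (hmem.2 hb), PySem.Set.add_of_mem hb, ih]
    · have h1 : PySem.Set.add (s.map (fun b => a + b)) (a + b) = (s ++ [b]).map (fun b => a + b) := by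
        simp [PySem.Set.add, PySem.Set.contains, hmem.not.2 hb]
      have h2 : PySem.Set.add s b = s ++ [b] := by
        simp [PySem.Set.add, PySem.Set.contains, hb]
      rw [h1, h2, ih]

theorem pvOfList_map_add (a : Int) (B : List Int) :
    PySem.Set.ofList (B.map (fun b => a + b)) = (PySem.Set.ofList B).map (fun b => a + b) := by
  have h1 : ∀ z : List Int, PySem.Set.ofList z = PySem.Set.update [] z := by
    intro z; rw [PySem.Set.ofList_eq_foldl]; rfl
  rw [h1, h1]
  simpa using pvUpdate_map_add a B []

-- K1: the two key streams have the same distinct elements in the same first-appearance order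
theorem pvK1 (A B : List Int) :
    PySem.Set.ofList (pvSums A B)
      = PySem.Set.ofList (pvSums (PySem.Set.ofList A) (PySem.Set.ofList B)) := by
  have h1 : ∀ z : List Int, PySem.Set.ofList z = PySem.Set.update [] z := by
    intro z; rw [PySem.Set.ofList_eq_foldl]; rfl
  have step1 := pvOfList_flatMap_dedup (fun a => B.map (fun b => a + b)) A
  have step2 : PySem.Set.update ([] : PySem.Set Int)
        ((PySem.Set.ofList A).flatMap (fun a => B.map (fun b => a + b)))
      = PySem.Set.update ([] : PySem.Set Int)
        ((PySem.Set.ofList A).flatMap (fun a => (PySem.Set.ofList B).map (fun b => a + b))) := by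
    apply pvUpdate_flatMap_congr
    intro a _ s
    rw [pvUpdate_dedup (B.map (fun b => a + b)) s, pvOfList_map_add]
  unfold pvSums
  rw [step1, h1, step2, ← h1]

-- weighted count computed by the bump fold
theorem pvBump_getD (L : List (Int × Int)) : ∀ (d : PySem.Dict Int Int) (k : Int),
    (pvBump L d).getD k 0 = d.getD k 0 + ((L.filter (fun p => p.1 == k)).map (·.2)).sum := by
  induction L with
  | nil => intro d k; simp [pvBump]
  | cons p t ih =>
    intro d k
    simp only [pvBump, List.foldl_cons] at *
    rw [ih]
    by_cases hk : p.1 = k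
    · simp [List.filter_cons, hk, PySem.Dict.getD_modify]
      ring
    · simp [List.filter_cons, hk, PySem.Dict.getD_modify, Ne.symm hk]

theorem pvNodup_filter_beq (c : Int) (l : List Int) (hl : l.Nodup) :
    l.filter (fun b => b == c) = if c ∈ l then [c] else [] := by
  induction l with
  | nil => simp
  | cons b t ih =>
    rcases List.nodup_cons.1 hl with ⟨hb, ht⟩
    by_cases hbc : b = c
    · subst hbc
      have hnil : List.filter (fun a => a == b) t = [] :=
        List.filter_eq_nil_iff.2 (fun a ha hc => hb (beq_iff_eq.1 hc ▸ ha))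
      simp [List.filter_cons, hnil]
    · simp [List.filter_cons, hbc, ih ht, Ne.symm hbc]

-- K2: both dicts assign every key the same multiplicity
theorem pvK2 (A B : List Int) (k : Int) :
    ((PySem.Dict.counter (pvSums A B)).getD k 0)
      = (pvBump (pvLB A B) PySem.Dict.empty).getD k 0 := by
  -- left side: plain count of k among all pairwise sums
  rw [PySem.Dict.getD_counter]
  have hcnt : List.count k (pvSums A B) = (A.map (fun a => B.count (k - a))).sum := by
    unfold pvSums
    rw [List.count_flatMap]
    congr 1
    apply List.map_congr_left
    intro a _
    show List.count k (B.map (fun b => a + b)) = B.count (k - a)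
    have := List.count_map_of_injective (l := B) (f := fun b => a + b)
      (fun u v huv => by dsimp at huv; omega) (k - a)
    simpa [show a + (k - a) = k by ring] using this
  -- right side: the convolution weights
  have hLB : pvLB A B = (PySem.Set.ofList A).flatMap (fun a =>
      (PySem.Set.ofList B).map (fun b => (a + b, (A.count a : Int) * (B.count b : Int)))) := by
    unfold pvLB
    rw [PySem.Dict.items_counter, PySem.Dict.items_counter, List.flatMap_map]
    congr 1
    funext a
    rw [List.map_map]
    rfl
  rw [pvBump_getD, hLB, PySem.Dict.getD_empty, List.filter_flatMap, List.map_flatMap]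
  have hchunk : ∀ a : Int,
      (((((PySem.Set.ofList B).map (fun b => (a + b, (A.count a : Int) * (B.count b : Int)))).filter
          (fun p => p.1 == k)).map (·.2)).sum)
        = (A.count a : Int) * (B.count (k - a) : Int) := by
    intro a
    rw [List.filter_map]
    have hpred : ((fun p : Int × Int => p.1 == k) ∘ (fun b => (a + b, (A.count a : Int) * (B.count b : Int))))
        = fun b => b == (k - a) := by
      funext b
      simp only [Function.comp]
      rw [Bool.eq_iff_iff, beq_iff_eq, beq_iff_eq]
      omega
    rw [hpred, pvNodup_filter_beq _ _ (PySem.Set.nodup_ofList B)]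
    by_cases hm : (k - a) ∈ PySem.Set.ofList B
    · simp [hm]
    · have : B.count (k - a) = 0 := List.count_eq_zero.2 (fun hc => hm ((PySem.Set.mem_ofList _ _).2 hc))
      simp [hm, this]
  -- sum over the flatMap chunk by chunk
  have hsum : ((PySem.Set.ofList A).flatMap (fun a =>
      ((((PySem.Set.ofList B).map (fun b => (a + b, (A.count a : Int) * (B.count b : Int)))).filter
          (fun p => p.1 == k)).map (·.2)))).sum
      = ((PySem.Set.ofList A).map (fun a => (A.count a : Int) * (B.count (k - a) : Int))).sum := by
    rw [List.flatMap, List.sum_flatten, List.map_map]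
    congr 1
    apply List.map_congr_left
    intro a _
    exact hchunk a
  rw [hsum]
  -- group the left count by distinct summand
  have htofin : (PySem.Set.ofList A).toFinset = A.toFinset := by
    ext e
    simp [List.mem_toFinset, PySem.Set.mem_ofList]
  have hcountA : ∀ a : Int, (PySem.Set.ofList A).count a = if a ∈ PySem.Set.ofList A then 1 else 0 := by
    intro a
    by_cases hm : a ∈ PySem.Set.ofList A
    · simp [hm, List.count_eq_one_of_mem (PySem.Set.nodup_ofList A) hm]
    · simp [hm, List.count_eq_zero.2 hm]
  have hgrp2 := List.sum_toFinset (fun a => (A.count a : Int) * (B.count (k - a) : Int))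
    (PySem.Set.nodup_ofList A)
  rw [hcnt, ← hgrp2, htofin, zero_add]
  have hL : ((List.map (fun a => List.count (k - a) B) A).map (Nat.cast : Nat → Int)).sum
      = ∑ m ∈ A.toFinset, List.count m A • ((List.count (k - m) B : Int)) := by
    rw [List.map_map]
    exact Finset.sum_list_map_count A _
  rw [Nat.cast_list_sum, hL]
  apply Finset.sum_congr rfl
  intro a _
  simp [nsmul_eq_mul]

-- the central equality: counting all pairwise sums = convolving the two counters
theorem pvMain (A B : List Int) :
    PySem.Dict.counter (pvSums A B) = pvBump (pvLB A B) PySem.Dict.empty := by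
  have hkeys2 : (pvBump (pvLB A B) PySem.Dict.empty).keys
      = PySem.Set.ofList ((pvLB A B).map (·.1)) := by
    unfold pvBump
    rw [PySem.Dict.keys_foldl_modify_key (pvLB A B) Prod.fst 0
      (fun d p v => v + p.2) PySem.Dict.empty]
    rw [PySem.Dict.keys_empty, PySem.Set.ofList_eq_foldl]
    rfl
  have hmapfst : (pvLB A B).map (·.1) = pvSums (PySem.Set.ofList A) (PySem.Set.ofList B) := by
    unfold pvLB pvSums
    rw [PySem.Dict.items_counter, PySem.Dict.items_counter, List.map_flatMap, List.flatMap_map]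
    congr 1
    funext a
    rw [List.map_map, List.map_map]
    rfl
  have hkeys : (PySem.Dict.counter (pvSums A B)).keys = (pvBump (pvLB A B) PySem.Dict.empty).keys := by
    rw [PySem.Dict.keys_counter, hkeys2, hmapfst, pvK1]
  have hnd1 : (PySem.Dict.counter (pvSums A B)).keys.Nodup := PySem.Dict.nodup_keys_counter _
  have hnd2 : (pvBump (pvLB A B) PySem.Dict.empty).keys.Nodup := by
    unfold pvBump
    exact PySem.Dict.nodup_keys_foldl_modify_key (pvLB A B) Prod.fst 0
      (fun d p v => v + p.2) PySem.Dict.empty (by rw [PySem.Dict.keys_empty]; exact List.nodup_nil)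
  apply PySem.Dict.ext
  rw [PySem.Dict.items_eq_map_keys _ hnd1 0, PySem.Dict.items_eq_map_keys _ hnd2 0, hkeys]
  apply List.map_congr_left
  intro k _
  rw [pvK2]

-- A's loop builds the counter of all pairwise sums (the lets of the port are zeta-reduced away)
theorem pvA_ret (n m x y : Int) :
    (PySem.List.pyRange 0 (n - 1)).foldl (fun ret x1 =>
      (PySem.List.pyRange (x1 + 1) n).foldl (fun ret x2 =>
        (PySem.List.pyRange 0 (m - 1)).foldl (fun ret y1 =>
          (PySem.List.pyRange (y1 + 1) m).foldl (fun ret y2 =>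
            ret.modify (|x1 - x| + |x2 - x| + |y1 - y| + |y2 - y|) 0 (· + 1)) ret) ret) ret)
      PySem.Dict.empty
    = PySem.Dict.counter (pvSums (pvDX n x) (pvDX m y)) := by
  rw [PySem.Dict.counter_eq_foldl]
  simp only [pvSums, pvDX, List.foldl_flatMap, List.foldl_map, add_assoc]

theorem pvB_cnt (n x : Int) :
    (PySem.List.pyRange 0 (n - 1)).foldl (fun d x1 =>
      (PySem.List.pyRange (x1 + 1) n).foldl (fun d x2 =>
        d.modify (|x1 - x| + |x2 - x|) 0 (· + 1)) d) PySem.Dict.empty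
    = PySem.Dict.counter (pvDX n x) := by
  rw [PySem.Dict.counter_eq_foldl]
  simp only [pvDX, List.foldl_flatMap, List.foldl_map]

theorem pvB_ret (A B : List Int) :
    (PySem.Dict.counter A).items.foldl (fun r p =>
      (PySem.Dict.counter B).items.foldl (fun r q =>
        r.modify (p.1 + q.1) 0 (· + p.2 * q.2)) r) PySem.Dict.empty
    = pvBump (pvLB A B) PySem.Dict.empty := by
  simp only [pvBump, pvLB, List.foldl_flatMap, List.foldl_map]

-- ===== VERDICT (by name: the statement is the Claim_ definition above) =====
theorem foo_spec : Claim_equal_foo := by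
  intro n m x y _ _
  show foo n m x y = foo_alt n m x y
  simp only [foo, foo_alt]
  rw [pvA_ret, pvB_cnt n x, pvB_cnt m y, pvB_ret, pvMain]
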